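-- pv_equiv track=rewrite | github.com/leechanhoe/study-algorithm | src/programmers/level1/과일_장수.py | solution
-- ===== SOURCE A (Python) =====
-- def solution(k, m, score):
--     score.sort(reverse=True)
--     s = 0
--     e = m - 1
--     answer = 0
--     while e < len(score):
--         answer += score[e] * m
--         s += m
--         e += m
--     return answer
-- ===== SOURCE B (Python) =====
-- def solution(k, m, score):
--     counts = {}
--     for v in score:
--         counts[v] = counts.get(v, 0) + 1
--     picked = 0
--     pos = 0
--     for v in sorted(counts, reverse=True):
--         c = counts[v]
--         picked += v * ((pos + c) // m - pos // m)
--         pos += c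
--     return m * picked
-- ===== Notes on version B (the rewrite author's own statement) =====
-- stated objective: alternative
-- what changed: Instead of reverse-sorting all n scores and striding over every m-th element, B builds a value->count histogram, sorts only the distinct values descending, and adds each value times a closed-form count of selected positions inside its run ((pos+c)//m - pos//m); A also sorts score in place while B leaves it unmutated (return values agree).
import Mathlib
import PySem

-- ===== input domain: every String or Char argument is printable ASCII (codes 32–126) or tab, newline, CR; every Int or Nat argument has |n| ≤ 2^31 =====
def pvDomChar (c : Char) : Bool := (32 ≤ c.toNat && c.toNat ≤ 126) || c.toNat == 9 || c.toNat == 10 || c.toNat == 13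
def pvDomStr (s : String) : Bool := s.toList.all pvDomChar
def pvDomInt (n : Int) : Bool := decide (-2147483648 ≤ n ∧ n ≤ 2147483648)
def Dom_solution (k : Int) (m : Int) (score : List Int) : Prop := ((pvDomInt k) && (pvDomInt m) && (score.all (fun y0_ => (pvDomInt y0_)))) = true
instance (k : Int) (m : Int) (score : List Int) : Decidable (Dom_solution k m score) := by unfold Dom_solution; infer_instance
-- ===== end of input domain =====

-- B replaces A's reverse sort of all n scores + stride loop by a value→count histogram, a sort of
-- the distinct values only, and a closed-form count of selected positions per run (alternative
-- decomposition, same result). A sorts `score` in place; B does not mutate its argument — the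
-- equivalence proved here is about the return value.

-- ===== PORT A =====
-- A's while-loop; fuel = score.length + 1 bounds the iteration count (each step moves e forward
-- by m ≥ 1 under Pre_; outside Pre_ the Python loop diverges or raises). Inside the guard
-- e < len and, under Pre_, 0 ≤ e, so pyGetD is exactly Python's score[e].

def solutionLoopA (sc : List Int) (m : Int) : Nat → Int → Int → Int → Int
  | 0, _, _, answer => answer
  | fuel + 1, s, e, answer =>
    if e < (sc.length : Int) then
      solutionLoopA sc m fuel (s + m) (e + m) (answer + (PySem.List.pyGetD sc e 0) * m)
    else answer

def solution (k : Int) (m : Int) (score : List Int) : Int :=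
  let sc := PySem.List.sorted score (fun x => x) true
  solutionLoopA sc m (sc.length + 1) 0 (m - 1) 0

-- ===== PORT B =====
def solution_alt (k : Int) (m : Int) (score : List Int) : Int :=
  let counts := score.foldl (fun d v => PySem.Dict.insert d v (PySem.Dict.getD d v 0 + 1)) PySem.Dict.empty
  let st := (PySem.List.sorted counts.keys (fun x => x) true).foldl
      (fun (st : Int × Int) v =>
        let c := PySem.Dict.getD counts v 0
        (st.1 + v * (PySem.Int.floordiv (st.2 + c) m - PySem.Int.floordiv st.2 m), st.2 + c))
      (0, 0)
  m * st.1

-- ===== PRECONDITION & SPEC =====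
-- Pre_ excludes exactly m ≤ 0, where Python's A never returns: for m = 0 the while-loop never
-- advances (diverges), for m < 0 the index e decreases until score[e] raises IndexError.
def Pre_solution (k : Int) (m : Int) (score : List Int) : Prop := 1 ≤ m
instance (k : Int) (m : Int) (score : List Int) : Decidable (Pre_solution k m score) := by unfold Pre_solution; infer_instance
def pvWitness_solution : Int × Int × List Int := (4, 2, [4, 1, 3, 2, 4])

def Spec_solution (k : Int) (m : Int) (score : List Int) (out : Int) : Prop := out = solution_alt k m score
instance (k : Int) (m : Int) (score : List Int) (out : Int) : Decidable (Spec_solution k m score out) := by unfold Spec_solution; infer_instance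

-- ===== CLAIM (what is proved, stated in full; the proofs are below) =====
def Claim_equal_solution : Prop := ∀ (k : Int) (m : Int) (score : List Int), Dom_solution k m score → Pre_solution k m score → Spec_solution k m score (solution k m score)

-- ===== LEMMAS AND PROOFS =====

lemma pyRange_stride_eq (m t : Int) (hm : 0 < m) (ht : 0 ≤ t) :
    PySem.List.pyRange (m - 1) t m = (List.range ((t / m).toNat)).map (fun j : Nat => m - 1 + (j : Int) * m) := by
  rw [PySem.List.pyRange_of_pos _ _ hm]
  by_cases h : m - 1 < t
  · have hn : t - (m - 1) + m - 1 = t := by ring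
    rw [if_pos h, hn]
    exact List.map_congr_left (fun j _ => by ring)
  · rw [if_neg h]
    have h0 : t / m = 0 := Int.ediv_eq_zero_of_lt ht (by omega)
    simp [h0]

def strideSum (L : List Int) (m t : Int) : Int :=
  ((PySem.List.pyRange (m - 1) t m).map (fun i => PySem.List.pyGetD L i 0)).sum

lemma strideSum_run (L : List Int) (m : Int) (hm : 0 < m) (pos : Int) (c : Nat) (v : Int)
    (hpos : 0 ≤ pos)
    (hrun : ∀ i : Int, pos ≤ i → i < pos + c → PySem.List.pyGetD L i 0 = v) :
    strideSum L m (pos + c) = strideSum L m pos + v * ((pos + c) / m - pos / m) := by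
  unfold strideSum
  rw [pyRange_stride_eq m _ hm (by omega), pyRange_stride_eq m pos hm hpos]
  have hq : pos / m ≤ (pos + c) / m := by
    apply Int.ediv_le_ediv hm; omega
  have hq0 : 0 ≤ pos / m := Int.ediv_nonneg hpos hm.le
  have hsplit : ((pos + c) / m).toNat = (pos / m).toNat + (((pos + c) / m).toNat - (pos / m).toNat) := by omega
  rw [hsplit, List.range_add, List.map_append, List.map_append, List.sum_append]
  congr 1
  simp only [List.map_map, Function.comp_def]
  have hmodp : m * (pos / m) + pos % m = pos := Int.mul_ediv_add_emod pos m
  have hmp0 : 0 ≤ pos % m := Int.emod_nonneg _ (ne_of_gt hm)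
  have hmpm : pos % m < m := Int.emod_lt_of_pos _ hm
  have hmodq : m * ((pos + c) / m) + (pos + c) % m = pos + c := Int.mul_ediv_add_emod _ m
  have hmq0 : 0 ≤ (pos + c) % m := Int.emod_nonneg _ (ne_of_gt hm)
  have hconst : ∀ j ∈ List.range (((pos + c) / m).toNat - (pos / m).toNat),
      (fun x : Nat => PySem.List.pyGetD L (m - 1 + (((pos / m).toNat + x : Nat) : Int) * m) 0) j = (fun _ : Nat => v) j := by
    intro j hj
    simp only [List.mem_range] at hj
    apply hrun
    · push_cast
      nlinarith [Int.toNat_of_nonneg hq0]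
    · have hjq : (((pos / m).toNat : Int) + j) ≤ (pos + c) / m - 1 := by omega
      push_cast
      nlinarith
  rw [List.map_congr_left hconst]
  simp only [List.map_const', List.length_range, List.sum_replicate, nsmul_eq_mul]
  rw [mul_comm]
  congr 1
  omega

lemma fold_runs (L : List Int) (m : Int) (hm : 0 < m) (cnt : Int → Nat) :
    ∀ (keys : List Int) (pos acc : Int), 0 ≤ pos → pos.toNat ≤ L.length →
      L.drop pos.toNat = keys.flatMap (fun v => List.replicate (cnt v) v) →
      keys.foldl (fun (st : Int × Int) v =>
          (st.1 + v * ((st.2 + (cnt v : Int)) / m - st.2 / m), st.2 + (cnt v : Int))) (acc, pos)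
        = (acc + (strideSum L m (L.length : Int) - strideSum L m pos), (L.length : Int)) := by
  intro keys
  induction keys with
  | nil =>
    intro pos acc hpos hple hdrop
    simp only [List.flatMap_nil, List.drop_eq_nil_iff] at hdrop
    have hposeq : pos = (L.length : Int) := by omega
    simp [hposeq]
  | cons v rest ih =>
    intro pos acc hpos hple hdrop
    simp only [List.flatMap_cons] at hdrop
    have hlen : L.length - pos.toNat = cnt v + (rest.flatMap (fun v => List.replicate (cnt v) v)).length := by
      have := congrArg List.length hdrop
      simpa using this
    have hdrop' : L.drop (pos + (cnt v : Int)).toNat = rest.flatMap (fun v => List.replicate (cnt v) v) := by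
      have h1 : (pos + (cnt v : Int)).toNat = pos.toNat + cnt v := by omega
      rw [h1, ← List.drop_drop, hdrop]
      simp
    have hrun : ∀ i : Int, pos ≤ i → i < pos + (cnt v : Int) → PySem.List.pyGetD L i 0 = v := by
      intro i h1 h2
      have hi0 : 0 ≤ i := le_trans hpos h1
      have hiL : i.toNat < L.length := by omega
      rw [PySem.List.pyGetD_eq_getElem L 0 (by omega) (by omega)]
      have hjlt : i.toNat - pos.toNat < (L.drop pos.toNat).length := by
        simp [List.length_drop]; omega
      have hkey : L[pos.toNat + (i.toNat - pos.toNat)]'(by omega) = v := by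
        rw [← List.getElem_drop (h := hjlt)]
        rw [List.getElem_of_eq hdrop hjlt]
        rw [List.getElem_append_left (by simp [List.length_replicate]; omega)]
        exact List.getElem_replicate _
      rw [getElem_congr rfl (by omega : i.toNat = pos.toNat + (i.toNat - pos.toNat)) (by omega)]
      exact hkey
    simp only [List.foldl_cons]
    rw [ih (pos + (cnt v : Int)) _ (by omega) (by omega) hdrop']
    rw [strideSum_run L m hm pos (cnt v) v hpos hrun]
    simp only [Prod.mk.injEq, and_true]
    ring

lemma desc_eq_rev_asc (score : List Int) :
    PySem.List.sorted score (fun x => x) true = (PySem.List.sorted score (fun x => x) false).reverse := by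
  refine List.Perm.eq_of_pairwise (le := fun a b : Int => b ≤ a)
    (fun a b _ _ h1 h2 => le_antisymm h2 h1) ?_ ?_ ?_
  · exact PySem.List.sorted_pairwise_rev score (fun x => x)
  · exact List.pairwise_reverse.mpr (PySem.List.sorted_pairwise score (fun x => x))
  · exact (PySem.List.sorted_perm score (fun x => x) true).trans
      ((PySem.List.sorted_perm score (fun x => x) false).symm.trans
        (List.reverse_perm _).symm)

lemma count_flatMap_replicate (cnt : Int → Nat) :
    ∀ (l : List Int), l.Nodup → ∀ x : Int,
      (l.flatMap (fun v => List.replicate (cnt v) v)).count x = if x ∈ l then cnt x else 0 := by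
  intro l
  induction l with
  | nil => intro _ x; simp
  | cons v rest ih =>
    intro hnd x
    rcases List.nodup_cons.mp hnd with ⟨hvn, hnd'⟩
    rw [List.flatMap_cons, List.count_append, ih hnd' x, List.count_replicate]
    by_cases hx : x = v
    · subst hx
      simp [hvn]
    · simp [hx, Ne.symm hx]

lemma pairwise_flatMap_replicate (cnt : Int → Nat) (l : List Int)
    (h : l.Pairwise (· < ·)) :
    (l.flatMap (fun v => List.replicate (cnt v) v)).Pairwise (· ≤ ·) := by
  induction l with
  | nil => simp
  | cons v rest ih =>
    rcases List.pairwise_cons.mp h with ⟨hv, h'⟩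
    rw [List.flatMap_cons, List.pairwise_append]
    refine ⟨List.pairwise_replicate.mpr (Or.inr le_rfl), ih h', ?_⟩
    intro a ha b hb
    rcases List.eq_of_mem_replicate ha with rfl
    rcases List.mem_flatMap.mp hb with ⟨w, hw, hbw⟩
    rcases List.eq_of_mem_replicate hbw with rfl
    exact (hv _ hw).le

lemma desc_eq_flatMap (score : List Int) :
    PySem.List.sorted score (fun x => x) true
      = (PySem.List.sorted (PySem.Set.ofList score) (fun x => x) true).flatMap
          (fun v => List.replicate (score.count v) v) := by
  have hplt : (PySem.List.sorted (PySem.Set.ofList score) (fun x => x) false).Pairwise (· < ·) :=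
    PySem.List.sorted_ofList_pairwise_lt score
  have hnd : (PySem.List.sorted (PySem.Set.ofList score) (fun x => x) false).Nodup :=
    hplt.imp (fun h => ne_of_lt h)
  have hmem : ∀ x : Int, x ∈ PySem.List.sorted (PySem.Set.ofList score) (fun x => x) false ↔ x ∈ score := by
    intro x
    rw [PySem.List.mem_sorted, PySem.Set.mem_ofList]
  -- ascending sorted = flatMap of runs over ascending distinct keys
  have hasc : PySem.List.sorted score (fun x => x) false
      = (PySem.List.sorted (PySem.Set.ofList score) (fun x => x) false).flatMap
          (fun v => List.replicate (score.count v) v) := by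
    apply PySem.List.sorted_id_eq_of_perm_of_pairwise
    · rw [List.perm_iff_count]
      intro a
      rw [count_flatMap_replicate (fun v => score.count v) _ hnd a]
      by_cases ha : a ∈ score
      · simp [(hmem a).mpr ha]
      · simp [ha, List.count_eq_zero.mpr ha]
    · exact pairwise_flatMap_replicate _ _ hplt
  -- descending distinct keys = reverse of ascending distinct keys
  have hkeys : PySem.List.sorted (PySem.Set.ofList score) (fun x => x) true
      = (PySem.List.sorted (PySem.Set.ofList score) (fun x => x) false).reverse := by
    apply PySem.List.sorted_rev_eq_of_perm_of_pairwise_gt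
    · exact (List.reverse_perm _).trans (PySem.List.sorted_perm _ _ _)
    · exact List.pairwise_reverse.mpr hplt
  rw [desc_eq_rev_asc, hasc, hkeys, List.reverse_flatMap]
  apply List.flatMap_congr
  intro v _
  simp [Function.comp, List.reverse_replicate]

lemma pyRange_pos_nil (a b s : Int) (hs : 0 < s) (hab : b ≤ a) :
    PySem.List.pyRange a b s = [] := by
  rw [PySem.List.pyRange_of_pos _ _ hs, if_neg (not_lt.2 hab)]
  simp

lemma pyRange_pos_cons (a b s : Int) (hs : 0 < s) (hab : a < b) :
    PySem.List.pyRange a b s = a :: PySem.List.pyRange (a + s) b s := by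
  rw [PySem.List.pyRange_of_pos _ _ hs, PySem.List.pyRange_of_pos _ _ hs, if_pos hab]
  have hnum : b - a + s - 1 = (b - a - 1) + 1 * s := by ring
  have hdiv0 : (0 : Int) ≤ (b - a - 1) / s := Int.ediv_nonneg (by omega) (le_of_lt hs)
  rw [hnum, Int.add_mul_ediv_right _ _ (ne_of_gt hs)]
  have htn : ((b - a - 1) / s + 1).toNat = ((b - a - 1) / s).toNat + 1 := by omega
  rw [htn, List.range_succ_eq_map, List.map_cons, List.map_map]
  congr 1
  · simp
  by_cases hab2 : a + s < b
  · rw [if_pos hab2]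
    have e1 : b - (a + s) + s - 1 = b - a - 1 := by ring
    rw [e1]
    apply List.map_congr_left
    intro x _
    simp only [Function.comp_apply]
    push_cast
    ring
  · rw [if_neg hab2]
    have e0 : (b - a - 1) / s = 0 := Int.ediv_eq_zero_of_lt (by omega) (by omega)
    simp [e0]

lemma loopA_eq (sc : List Int) (m : Int) (hm : 0 < m) :
    ∀ (fuel : Nat) (s e ans : Int), (sc.length : Int) - e ≤ fuel →
      solutionLoopA sc m fuel s e ans
        = ans + ((PySem.List.pyRange e sc.length m).map (fun i => PySem.List.pyGetD sc i 0)).sum * m := by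
  intro fuel
  induction fuel with
  | zero =>
    intro s e ans hfe
    rw [pyRange_pos_nil _ _ _ hm (by push_cast at hfe ⊢; omega)]
    simp [solutionLoopA]
  | succ n ih =>
    intro s e ans hfe
    by_cases he : e < (sc.length : Int)
    · simp only [solutionLoopA, if_pos he]
      rw [ih _ _ _ (by push_cast at hfe ⊢; omega)]
      rw [pyRange_pos_cons _ _ _ hm he]
      simp only [List.map_cons, List.sum_cons]
      ring
    · simp only [solutionLoopA, if_neg he]
      rw [pyRange_pos_nil _ _ _ hm (not_lt.1 he)]
      simp

-- ===== VERDICT (by name: the statement is the Claim_ definition above) =====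
theorem solution_spec : Claim_equal_solution := by
  intro k m score _ hm
  unfold Spec_solution
  have hm' : (0 : Int) < m := hm
  unfold solution solution_alt
  rw [loopA_eq _ m hm' _ 0 (m - 1) 0 (by push_cast; omega)]
  rw [PySem.Dict.foldl_insert_getD_add_one_eq_counter]
  simp only [PySem.Dict.keys_counter]
  set keysd := PySem.List.sorted (PySem.Set.ofList score) (fun x => x) true with hkeysd
  have hstep : ∀ (st : Int × Int), ∀ v ∈ keysd,
      (st.1 + v * (PySem.Int.floordiv (st.2 + PySem.Dict.getD (PySem.Dict.counter score) v 0) m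
          - PySem.Int.floordiv st.2 m), st.2 + PySem.Dict.getD (PySem.Dict.counter score) v 0)
        = (st.1 + v * ((st.2 + ((score.count v : Nat) : Int)) / m - st.2 / m), st.2 + ((score.count v : Nat) : Int)) := by
    intro st v _
    rw [PySem.Dict.getD_counter, PySem.Int.floordiv_eq_ediv_of_pos hm', PySem.Int.floordiv_eq_ediv_of_pos hm']
  rw [PySem.List.foldl_congr_mem keysd _ _ (0, 0) hstep]
  have hL : PySem.List.sorted score (fun x => x) true
      = keysd.flatMap (fun v => List.replicate (score.count v) v) := desc_eq_flatMap score
  rw [fold_runs (PySem.List.sorted score (fun x => x) true) m hm' (fun v => score.count v) keysd 0 0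
    le_rfl (by simp) (by simpa using hL)]
  have h0 : strideSum (PySem.List.sorted score (fun x => x) true) m 0 = 0 := by
    unfold strideSum
    rw [pyRange_pos_nil _ _ _ hm' (by omega)]
    simp
  unfold strideSum at *
  rw [h0]
  ring
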